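-- pv_equiv track=rewrite | github.com/liminm/pjkj | src/ruleserver/rules.py | validUCI
-- ===== SOURCE A (Python) =====
-- def validUCI(uci):
--     ret = True
--     if len(uci) == 4:
--         for i in range(0,4):
--             if (i== 0 or i == 2) and not(uci[i] in 'abcdefgh'):
--                 ret = False
--                 break
--             if (i== 1 or i == 3) and not(uci[i] in '12345678'):
--                 ret = False
--                 break
--     else :
--         ret = False
--     return ret
-- ===== SOURCE B (Python) =====
-- import re
--
-- _UCI_RE = re.compile(r'[a-h][1-8][a-h][1-8]')
--
-- def validUCI(uci):
--     return bool(_UCI_RE.fullmatch(uci))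
-- ===== Notes on version B (the rewrite author's own statement) =====
-- stated objective: idiomatic
-- what changed: Replaces the index loop with per-position set membership and parity branching by a single precompiled regex fullmatch against the fixed-width pattern [a-h][1-8][a-h][1-8].
import Mathlib
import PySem

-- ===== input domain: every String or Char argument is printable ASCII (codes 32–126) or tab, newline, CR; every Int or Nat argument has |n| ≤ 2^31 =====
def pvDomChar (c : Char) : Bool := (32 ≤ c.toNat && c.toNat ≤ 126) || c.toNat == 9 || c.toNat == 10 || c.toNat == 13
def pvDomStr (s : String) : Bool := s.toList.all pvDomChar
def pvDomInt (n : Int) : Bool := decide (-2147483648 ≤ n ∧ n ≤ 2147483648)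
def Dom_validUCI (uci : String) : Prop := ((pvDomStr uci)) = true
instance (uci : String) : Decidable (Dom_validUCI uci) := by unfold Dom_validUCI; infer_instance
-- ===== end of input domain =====

-- B replaces A's index loop with parity branching by a single regex-style fullmatch of the
-- fixed-width pattern [a-h][1-8][a-h][1-8]; idiomatic, same cost.

-- ===== PORT A =====
-- the body of A's 'for i in range(0,4)', with 'break' (after ret = False) ported as
-- returning false; uci[i] is in range because the loop only runs when len(uci) == 4,
-- so the getD default is never used and pyGet? is exact here.
def validUCI_loop (cs : List Char) : List Int → Bool
  | [] => true
  | i :: rest =>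
    let c := (PySem.List.pyGet? cs i).getD ' '
    if (i == 0 || i == 2) && !("abcdefgh".toList.contains c) then
      false
    else if (i == 1 || i == 3) && !("12345678".toList.contains c) then
      false
    else
      validUCI_loop cs rest

def validUCI (uci : String) : Bool :=
  if uci.toList.length == 4 then
    validUCI_loop uci.toList (PySem.List.pyRange 0 4 1)
  else
    false

-- ===== PORT B =====
-- port of Source B's re.fullmatch(r'[a-h][1-8][a-h][1-8]', uci): a fullmatch of this
-- fixed-width pattern = exactly four chars, each in its contiguous character class.
def isFile (c : Char) : Bool := 'a' ≤ c && c ≤ 'h'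
def isRank (c : Char) : Bool := '1' ≤ c && c ≤ '8'

def validUCI_alt (uci : String) : Bool :=
  match uci.toList with
  | [a, b, c, d] => isFile a && isRank b && isFile c && isRank d
  | _ => false

-- ===== PRECONDITION & SPEC =====
def Spec_validUCI (uci : String) (out : Bool) : Prop := out = validUCI_alt uci
instance (uci : String) (out : Bool) : Decidable (Spec_validUCI uci out) := by unfold Spec_validUCI; infer_instance

-- ===== CLAIM (what is proved, stated in full; the proofs are below) =====
def Claim_equal_validUCI : Prop := ∀ (uci : String), Dom_validUCI uci → Spec_validUCI uci (validUCI uci)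

-- ===== LEMMAS AND PROOFS =====

-- membership in the literal 'abcdefgh' equals the [a-h] range check
theorem file_mem_iff (c : Char) :
    "abcdefgh".toList.contains c = isFile c := by
  have hl : "abcdefgh".toList = ['a','b','c','d','e','f','g','h'] := by decide
  rw [hl, Bool.eq_iff_iff]
  simp only [isFile, List.contains_eq_mem, List.mem_cons, List.not_mem_nil, or_false,
    decide_eq_true_eq, Bool.and_eq_true, Char.le_def, UInt32.le_iff_toNat_le,
    Char.ext_iff, UInt32.ext_iff]
  constructor
  · rintro (h | h | h | h | h | h | h | h) <;> simp [h]
  · rintro ⟨h1, h2⟩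
    have e97 : ('a').val.toNat = 97 := rfl
    have e98 : ('b').val.toNat = 98 := rfl
    have e99 : ('c').val.toNat = 99 := rfl
    have e100 : ('d').val.toNat = 100 := rfl
    have e101 : ('e').val.toNat = 101 := rfl
    have e102 : ('f').val.toNat = 102 := rfl
    have e103 : ('g').val.toNat = 103 := rfl
    have e104 : ('h').val.toNat = 104 := rfl
    rw [e97] at h1; rw [e104] at h2
    simp only [e97, e98, e99, e100, e101, e102, e103, e104]
    omega

-- membership in the literal '12345678' equals the [1-8] range check
theorem rank_mem_iff (c : Char) :
    "12345678".toList.contains c = isRank c := by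
  have hl : "12345678".toList = ['1','2','3','4','5','6','7','8'] := by decide
  rw [hl, Bool.eq_iff_iff]
  simp only [isRank, List.contains_eq_mem, List.mem_cons, List.not_mem_nil, or_false,
    decide_eq_true_eq, Bool.and_eq_true, Char.le_def, UInt32.le_iff_toNat_le,
    Char.ext_iff, UInt32.ext_iff]
  constructor
  · rintro (h | h | h | h | h | h | h | h) <;> simp [h]
  · rintro ⟨h1, h2⟩
    have e49 : ('1').val.toNat = 49 := rfl
    have e50 : ('2').val.toNat = 50 := rfl
    have e51 : ('3').val.toNat = 51 := rfl
    have e52 : ('4').val.toNat = 52 := rfl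
    have e53 : ('5').val.toNat = 53 := rfl
    have e54 : ('6').val.toNat = 54 := rfl
    have e55 : ('7').val.toNat = 55 := rfl
    have e56 : ('8').val.toNat = 56 := rfl
    rw [e49] at h1; rw [e56] at h2
    simp only [e49, e50, e51, e52, e53, e54, e55, e56]
    omega

-- ===== VERDICT (by name: the statement is the Claim_ definition above) =====
theorem validUCI_spec : Claim_equal_validUCI := by
  intro uci _
  unfold Spec_validUCI validUCI validUCI_alt
  have hr4 : PySem.List.pyRange 0 4 1 = [0, 1, 2, 3] := by decide
  rcases h : uci.toList with _ | ⟨a, _ | ⟨b, _ | ⟨c, _ | ⟨d, _ | ⟨e, t⟩⟩⟩⟩⟩ <;>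
    simp only [hr4, validUCI_loop, List.length_cons, List.length_nil,
      PySem.List.pyGet?, PySem.List.pyIdx?] <;>
    norm_num
  simp only [show Int.toNat 2 = 2 from rfl, show Int.toNat 3 = 3 from rfl,
    List.getElem_cons_succ, List.getElem_cons_zero, ← List.contains_eq_mem,
    file_mem_iff, rank_mem_iff]
  cases isFile a <;> cases isRank b <;> cases isFile c <;> cases isRank d <;> simp
  -- remaining case: five or more characters; the length test 'len(uci) == 4' is false
  intro hlen
  omega
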